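-- pv_equiv track=rewrite | github.com/lenpr/openclaw-context-census | src_content_census/analysis.py | _ordered_counter
-- ===== SOURCE A (Python) =====
-- from collections import Counter
--
-- def _ordered_counter(counter: Counter[str], preferred_order: list[str]) -> dict[str, int]:
--     result: dict[str, int] = {}
--     for key in preferred_order:
--         if key in counter:
--             result[key] = counter[key]
--     for key in sorted(counter):
--         if key not in result:
--             result[key] = counter[key]
--     return result
-- ===== SOURCE B (Python) =====
-- def _ordered_counter(counter, preferred_order):
--     sentinel = len(preferred_order)
--     pos = {}
--     for i, key in enumerate(preferred_order):
--         if key not in pos: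
--             pos[key] = i
--     ordered = sorted(counter, key=lambda k: (pos.get(k, sentinel), k))
--     return {k: counter[k] for k in ordered}
-- ===== Notes on version B (the rewrite author's own statement) =====
-- stated objective: alternative
-- what changed: Replaces A's two dict-building loops (preferred pass, then sorted-remainder pass with membership tests against the growing result) by one index table of first-occurrence positions plus a single sort of all counter keys under the composite key (pos.get(k, sentinel), k).
import Mathlib
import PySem

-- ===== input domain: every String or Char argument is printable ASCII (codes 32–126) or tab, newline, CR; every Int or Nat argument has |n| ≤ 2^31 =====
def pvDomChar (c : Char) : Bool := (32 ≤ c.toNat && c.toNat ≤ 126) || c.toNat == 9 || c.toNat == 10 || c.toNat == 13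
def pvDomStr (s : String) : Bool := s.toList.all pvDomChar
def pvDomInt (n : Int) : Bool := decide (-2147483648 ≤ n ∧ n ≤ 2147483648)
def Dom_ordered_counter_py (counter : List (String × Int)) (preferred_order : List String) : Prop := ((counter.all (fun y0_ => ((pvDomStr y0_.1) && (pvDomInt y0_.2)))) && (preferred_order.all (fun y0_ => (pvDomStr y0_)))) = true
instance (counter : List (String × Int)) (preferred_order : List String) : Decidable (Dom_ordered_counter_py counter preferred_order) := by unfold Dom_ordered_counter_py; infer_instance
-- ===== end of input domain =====

-- B replaces A's two dict-building loops by a first-occurrence position table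
-- plus ONE sort of all counter keys under the composite key (pos.get(k, sentinel), k);
-- objective: alternative algorithm, same values on every input.

-- ===== PORT A =====
-- literal port of A: two loops growing a dict, membership-checking the growing result
def ordered_counter_py (counter : List (String × Int)) (preferred_order : List String) : List (String × Int) :=
  let c := PySem.Dict.ofList counter
  let result1 := preferred_order.foldl
    (fun r key => if c.contains key then r.insert key (c.getD key 0) else r)
    PySem.Dict.empty
  let result2 := (PySem.List.sorted c.keys (fun k => k)).foldl
    (fun r key => if !(r.contains key) then r.insert key (c.getD key 0) else r)
    result1
  result2.items

-- ===== PORT B =====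
-- literal port of Source B: first-occurrence index table, one sort with a tuple key, one comprehension
def ordered_counter_py_alt (counter : List (String × Int)) (preferred_order : List String) : List (String × Int) :=
  let c := PySem.Dict.ofList counter
  let sentinel : Int := preferred_order.length
  let pos := (PySem.List.enumerate preferred_order).foldl
    (fun d p => if !(d.contains p.2) then d.insert p.2 p.1 else d)
    (PySem.Dict.empty : PySem.Dict String Int)
  let ordered := PySem.List.sorted2 c.keys (fun k => pos.getD k sentinel) (fun k => k)
  ordered.map (fun k => (k, c.getD k 0))

-- ===== PRECONDITION & SPEC =====
def Spec_ordered_counter_py (counter : List (String × Int)) (preferred_order : List String) (out : List (String × Int)) : Prop := out = ordered_counter_py_alt counter preferred_order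
instance (counter : List (String × Int)) (preferred_order : List String) (out : List (String × Int)) : Decidable (Spec_ordered_counter_py counter preferred_order out) := by unfold Spec_ordered_counter_py; infer_instance

-- ===== CLAIM (what is proved, stated in full; the proofs are below) =====
def Claim_equal_ordered_counter_py : Prop := ∀ (counter : List (String × Int)) (preferred_order : List String), Dom_ordered_counter_py counter preferred_order → Spec_ordered_counter_py counter preferred_order (ordered_counter_py counter preferred_order)

-- ===== LEMMAS AND PROOFS =====

-- A's first loop = plain inserts over the filtered key list
theorem pv_loop1_filter (c : PySem.Dict String Int) (l : List String) (d : PySem.Dict String Int) :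
    l.foldl (fun r key => if c.contains key then r.insert key (c.getD key 0) else r) d
      = (l.filter (fun k => c.contains k)).foldl (fun r key => r.insert key (c.getD key 0)) d := by
  induction l generalizing d with
  | nil => rfl
  | cons x t ih =>
    by_cases h : c.contains x
    · simp [List.filter, h, ih]
    · simp [List.filter, h, ih]

-- set-of-filter is filter-of-set
theorem pv_ofList_filter (p : String → Bool) (xs : List String) :
    PySem.Set.ofList (xs.filter p) = (PySem.Set.ofList xs).filter p := by
  induction xs with
  | nil => simp
  | cons x t ih =>
    by_cases hp : p x
    · rw [List.filter_cons_of_pos hp, PySem.Set.ofList_cons, PySem.Set.ofList_cons,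
        List.filter_cons_of_pos hp, ih]
      simp only [PySem.Set.discard]
      rw [List.filter_comm]
    · have hfil : ∀ (ys : List String), (x :: ys).filter p = ys.filter p := fun ys => by
        simp [hp]
      rw [hfil, PySem.Set.ofList_cons, ih, hfil]
      simp only [PySem.Set.discard]
      rw [List.filter_comm]
      refine (List.filter_eq_self.mpr ?_).symm
      intro y hy
      have hpy : p y = true := List.of_mem_filter hy
      have : y ≠ x := fun he => hp (he ▸ hpy)
      simp [this]

-- getD after a fold of unconditional inserts with key-determined values
theorem pv_getD_foldl_insert (g : String → Int) (l : List String) (d : PySem.Dict String Int) (k : String) :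
    (l.foldl (fun r key => r.insert key (g key)) d).getD k 0
      = if k ∈ l then g k else d.getD k 0 := by
  induction l generalizing d with
  | nil => simp
  | cons x t ih =>
    simp only [List.foldl_cons, ih, PySem.Dict.getD_insert]
    by_cases ht : k ∈ t
    · simp [ht]
    · by_cases hx : k = x <;> simp [ht, hx]

-- A's second loop appends the yet-unseen keys, in order
theorem pv_loop2_items (g : String → Int) (l : List String) (d : PySem.Dict String Int) (hnd : l.Nodup) :
    (l.foldl (fun r key => if !(r.contains key) then r.insert key (g key) else r) d).items
      = d.items ++ (l.filter (fun k => !(d.contains k))).map (fun k => (k, g k)) := by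
  induction l generalizing d with
  | nil => simp
  | cons x t ih =>
    rcases List.nodup_cons.mp hnd with ⟨hx, hnt⟩
    by_cases h : d.contains x
    · rw [List.foldl_cons, if_neg (by simp [h]), ih _ hnt]
      simp [List.filter, h]
    · rw [List.foldl_cons, if_pos (by simp [h]), ih _ hnt]
      rw [PySem.Dict.items_insert_of_not_contains _ _ (by simp [h])]
      rw [List.filter_congr (l := t) (q := fun k => !(d.contains k))
        (by intro k hk
            have : k ≠ x := fun he => hx (he ▸ hk)
            simp [PySem.Dict.contains_insert, this])]
      simp [List.filter, h]

-- A's value in canonical form: preferred-present keys first, then the sorted rest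
theorem pv_A_canon (counter : List (String × Int)) (preferred_order : List String) :
    ordered_counter_py counter preferred_order
      = (((PySem.Set.ofList preferred_order).filter (fun k => (PySem.Dict.ofList counter).contains k))
          ++ (PySem.List.sorted (PySem.Dict.ofList counter).keys (fun k => k)).filter
               (fun k => !(((PySem.Set.ofList preferred_order).filter (fun k => (PySem.Dict.ofList counter).contains k)).contains k))).map
          (fun k => (k, (PySem.Dict.ofList counter).getD k 0)) := by
  simp only [ordered_counter_py]
  set c := PySem.Dict.ofList counter with hc
  set F := preferred_order.filter (fun k => c.contains k) with hF
  set P := (PySem.Set.ofList preferred_order).filter (fun k => c.contains k) with hP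
  have hPF : PySem.Set.ofList F = P := pv_ofList_filter _ _
  have hPnd : P.Nodup := (PySem.Set.nodup_ofList preferred_order).filter _
  set r1 := preferred_order.foldl
    (fun r key => if c.contains key then r.insert key (c.getD key 0) else r)
    PySem.Dict.empty with hr1
  have hr1f : r1 = F.foldl (fun r key => r.insert key (c.getD key 0)) PySem.Dict.empty :=
    pv_loop1_filter c preferred_order _
  have hkeys1 : r1.keys = P := by
    rw [hr1f, PySem.Dict.keys_foldl_insert F (fun _ x => c.getD x 0) PySem.Dict.empty,
      PySem.Dict.keys_empty, PySem.Set.update_nil_left, hPF]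
  have hcont1 : ∀ k, r1.contains k = decide (k ∈ P) := fun k => by
    rw [PySem.Dict.contains_eq_decide_mem_keys, hkeys1]
  have hgetD : ∀ k ∈ P, r1.getD k 0 = c.getD k 0 := by
    intro k hk
    have hkF : k ∈ F := by
      have hiff := PySem.Set.mem_ofList F k
      rw [hPF] at hiff
      exact hiff.mp hk
    rw [hr1f, pv_getD_foldl_insert, if_pos hkF]
  have hitems1 : r1.items = P.map (fun k => (k, c.getD k 0)) := by
    rw [PySem.Dict.items_eq_map_keys r1 (by rw [hkeys1]; exact hPnd) 0, hkeys1]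
    exact List.map_congr_left fun k hk => by rw [hgetD k hk]
  set S := PySem.List.sorted c.keys (fun k => k) with hS
  have hkeysnd : c.keys.Nodup := PySem.Dict.nodup_keys_ofList counter
  have hSperm : S.Perm c.keys := PySem.List.sorted_perm c.keys (fun k => k) false
  have hSnd : S.Nodup := hSperm.symm.nodup hkeysnd
  have hA : (S.foldl (fun r key => if !(r.contains key) then r.insert key (c.getD key 0) else r) r1).items
      = r1.items ++ (S.filter (fun k => !(r1.contains k))).map (fun k => (k, c.getD k 0)) :=
    pv_loop2_items _ S r1 hSnd
  have hpred : (fun k => !(P.contains k)) = (fun k => !(r1.contains k)) := by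
    funext k
    simp [hcont1 k]
  rw [hA, hitems1, List.map_append, hpred]

-- the position table reads back the first-occurrence index of keys of l not already in d
theorem pv_pos_getD_aux (l : List String) (n : Int) (d : PySem.Dict String Int) (s : Int) (k : String) :
    ((PySem.List.enumerate l n).foldl
        (fun d p => if !(d.contains p.2) then d.insert p.2 p.1 else d) d).getD k s
      = if d.contains k then d.getD k s
        else if k ∈ l then n + (l.idxOf k : Int) else d.getD k s := by
  induction l generalizing n d with
  | nil => simp [PySem.List.enumerate_nil]
  | cons x t ih =>
    rw [PySem.List.enumerate_cons, List.foldl_cons]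
    by_cases hdx : d.contains x
    · rw [if_neg (by simp [hdx]), ih]
      by_cases hdk : d.contains k
      · simp [hdk]
      · rw [if_neg hdk, if_neg hdk]
        by_cases hkx : k = x
        · exact absurd (hkx ▸ hdx) hdk
        · by_cases hkt : k ∈ t
          · rw [if_pos hkt, if_pos (List.mem_cons.mpr (Or.inr hkt)),
              List.idxOf_cons_ne _ (Ne.symm hkx)]
            push_cast
            ring
          · rw [if_neg hkt, if_neg (by simp [hkx, hkt])]
    · rw [if_pos (by simp [hdx]), ih]
      by_cases hkx : k = x
      · subst hkx
        rw [if_pos (by simp), PySem.Dict.getD_insert, if_pos rfl]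
        rw [if_neg (by simp [hdx]), if_pos (List.mem_cons_self), List.idxOf_cons_self]
        simp
      · have hc : (d.insert x n).contains k = d.contains k := by
          simp [PySem.Dict.contains_insert, hkx]
        have hg : (d.insert x n).getD k s = d.getD k s := by
          rw [PySem.Dict.getD_insert, if_neg hkx]
        rw [hc, hg]
        by_cases hdk : d.contains k
        · simp [hdk]
        · rw [if_neg hdk, if_neg hdk]
          by_cases hkt : k ∈ t
          · rw [if_pos hkt, if_pos (List.mem_cons.mpr (Or.inr hkt)),
              List.idxOf_cons_ne _ (Ne.symm hkx)]
            push_cast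
            ring
          · rw [if_neg hkt, if_neg (by simp [hkx, hkt])]

theorem pv_pos_getD (l : List String) (k : String) :
    ((PySem.List.enumerate l 0).foldl
        (fun d p => if !(d.contains p.2) then d.insert p.2 p.1 else d)
        (PySem.Dict.empty : PySem.Dict String Int)).getD k (l.length : Int)
      = (l.idxOf k : Int) := by
  rw [pv_pos_getD_aux, if_neg (by simp [PySem.Dict.contains_empty]), PySem.Dict.getD_empty]
  by_cases hk : k ∈ l
  · simp [hk]
  · simp [hk]

-- a tuple-key sort is a sort by the lexicographic product key
theorem pv_sorted2_eq_sorted_lex (xs : List String) (k1 : String → Int) :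
    PySem.List.sorted2 xs k1 (fun k => k)
      = PySem.List.sorted xs (fun k => toLex (k1 k, k)) := by
  have hcmp : (fun a b : String => decide (k1 a < k1 b) || (!decide (k1 b < k1 a) && decide (a < b)))
      = (fun a b : String => decide ((toLex (k1 a, a) : Lex (Int × String)) < toLex (k1 b, b))) := by
    funext a b
    rcases lt_trichotomy (k1 a) (k1 b) with h | h | h
    · simp [h, Prod.Lex.toLex_lt_toLex, not_lt_of_gt h]
    · simp [h, Prod.Lex.toLex_lt_toLex]
    · simp [Prod.Lex.toLex_lt_toLex, h, not_lt_of_gt h, ne_of_gt h]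
  calc PySem.List.sorted2 xs k1 (fun k => k)
      = xs.foldl (fun acc x => PySem.List.insertBy
          (fun a b : String => decide (k1 a < k1 b) || (!decide (k1 b < k1 a) && decide (a < b)))
          x acc) [] := rfl
    _ = xs.foldl (fun acc x => PySem.List.insertBy
          (fun a b : String => decide ((toLex (k1 a, a) : Lex (Int × String)) < toLex (k1 b, b)))
          x acc) [] := by rw [hcmp]
    _ = PySem.List.sorted xs (fun k => toLex (k1 k, k)) :=
        (PySem.List.sorted_eq_foldl_insertBy xs (fun k => toLex (k1 k, k))).symm

-- first-occurrence order: the distinct elements are strictly increasing in idxOf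
theorem pv_ofList_pairwise_idxOf (l : List String) :
    (PySem.Set.ofList l).Pairwise (fun a b => l.idxOf a < l.idxOf b) := by
  induction l with
  | nil => simp
  | cons x t ih =>
    rw [PySem.Set.ofList_cons]
    refine List.pairwise_cons.mpr ⟨?_, ?_⟩
    · intro y hy
      have hyt : y ∈ t := (PySem.Set.mem_ofList t y).mp (List.mem_of_mem_filter hy)
      have hyx : ¬(y = x) := by
        have := List.of_mem_filter hy
        simpa using this
      rw [List.idxOf_cons_self, List.idxOf_cons_ne _ (Ne.symm hyx)]
      omega
    · refine (ih.filter _).imp_of_mem ?_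
      intro a b ha hb hab
      have hax : ¬(a = x) := by simpa using List.of_mem_filter ha
      have hbx : ¬(b = x) := by simpa using List.of_mem_filter hb
      rw [List.idxOf_cons_ne _ (Ne.symm hax), List.idxOf_cons_ne _ (Ne.symm hbx)]
      omega

-- B's value in the same canonical form
theorem pv_B_canon (counter : List (String × Int)) (preferred_order : List String) :
    ordered_counter_py_alt counter preferred_order
      = (((PySem.Set.ofList preferred_order).filter (fun k => (PySem.Dict.ofList counter).contains k))
          ++ (PySem.List.sorted (PySem.Dict.ofList counter).keys (fun k => k)).filter
               (fun k => !(((PySem.Set.ofList preferred_order).filter (fun k => (PySem.Dict.ofList counter).contains k)).contains k))).map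
          (fun k => (k, (PySem.Dict.ofList counter).getD k 0)) := by
  simp only [ordered_counter_py_alt]
  set c := PySem.Dict.ofList counter with hc
  set P := (PySem.Set.ofList preferred_order).filter (fun k => c.contains k) with hP
  set S := PySem.List.sorted c.keys (fun k => k) with hS
  set rest := S.filter (fun k => !(P.contains k)) with hrest
  have hkey : (fun k => (((PySem.List.enumerate preferred_order 0).foldl
        (fun d p => if !(d.contains p.2) then d.insert p.2 p.1 else d)
        (PySem.Dict.empty : PySem.Dict String Int)).getD k (preferred_order.length : Int)))
      = (fun k : String => (preferred_order.idxOf k : Int)) := by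
    funext k
    exact pv_pos_getD preferred_order k
  rw [hkey, pv_sorted2_eq_sorted_lex]
  congr 1
  -- it remains: sorted c.keys (lex key) = P ++ rest
  have hkeysnd : c.keys.Nodup := PySem.Dict.nodup_keys_ofList counter
  have hSperm : S.Perm c.keys := PySem.List.sorted_perm c.keys (fun k => k) false
  have hSnd : S.Nodup := hSperm.symm.nodup hkeysnd
  have hPnd : P.Nodup := (PySem.Set.nodup_ofList preferred_order).filter _
  have hmemP : ∀ k, k ∈ P ↔ (k ∈ PySem.Set.ofList preferred_order ∧ c.contains k = true) := by
    intro k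
    constructor
    · intro h
      exact ⟨List.mem_of_mem_filter h, List.of_mem_filter h⟩
    · intro ⟨h1, h2⟩
      exact List.mem_filter.mpr ⟨h1, h2⟩
  have hcontkeys : ∀ k, c.contains k = true ↔ k ∈ c.keys := by
    intro k
    rw [PySem.Dict.contains_eq_decide_mem_keys]
    simp
  -- the concatenation is a permutation of c.keys
  have hperm : (P ++ rest).Perm c.keys := by
    have h1 : P.Perm (c.keys.filter (fun k => P.contains k)) := by
      rw [List.perm_ext_iff_of_nodup hPnd (hkeysnd.filter _)]
      intro a
      constructor
      · intro ha
        refine List.mem_filter.mpr ⟨(hcontkeys a).mp ((hmemP a).mp ha).2, by simpa using ha⟩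
      · intro ha
        simpa using (List.mem_filter.mp ha).2
    have h2 : rest.Perm (c.keys.filter (fun k => !(P.contains k))) := by
      rw [hrest]
      exact (hSperm.filter _)
    exact (h1.append h2).trans (List.filter_append_perm _ c.keys)
  -- the concatenation is strictly increasing under the lex key
  have hidxP : ∀ k ∈ P, preferred_order.idxOf k < preferred_order.length := by
    intro k hk
    have : k ∈ preferred_order := (PySem.Set.mem_ofList preferred_order k).mp ((hmemP k).mp hk).1
    exact List.idxOf_lt_length_of_mem this
  have hidxR : ∀ k ∈ rest, preferred_order.idxOf k = preferred_order.length := by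
    intro k hk
    have hkS : k ∈ S := List.mem_of_mem_filter hk
    have hknP : ¬(k ∈ P) := by simpa using List.of_mem_filter hk
    have hkkeys : k ∈ c.keys := (PySem.List.mem_sorted c.keys (fun k => k) false k).mp hkS
    have : ¬(k ∈ preferred_order) := by
      intro hmem
      exact hknP ((hmemP k).mpr ⟨(PySem.Set.mem_ofList preferred_order k).mpr hmem, (hcontkeys k).mpr hkkeys⟩)
    exact List.idxOf_eq_length_iff.mpr this
  have hpw : (P ++ rest).Pairwise
      (fun a b => (toLex ((preferred_order.idxOf a : Int), a)) < (toLex ((preferred_order.idxOf b : Int), b))) := by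
    rw [List.pairwise_append]
    refine ⟨?_, ?_, ?_⟩
    · refine ((pv_ofList_pairwise_idxOf preferred_order).filter _).imp_of_mem ?_
      intro a b _ _ hab
      rw [Prod.Lex.toLex_lt_toLex]
      left
      dsimp only
      exact_mod_cast hab
    · have hle : rest.Pairwise (fun a b : String => a ≤ b) := by
        rw [hrest]
        exact (PySem.List.sorted_pairwise c.keys (fun k => k)).filter _
      have hlt : rest.Pairwise (fun a b : String => a < b) := by
        have hrnd : rest.Nodup := hSnd.filter _
        exact (hle.and hrnd).imp (fun h => lt_of_le_of_ne h.1 h.2)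
      refine hlt.imp_of_mem ?_
      intro a b ha hb hab
      rw [Prod.Lex.toLex_lt_toLex]
      right
      dsimp only
      exact ⟨by rw [hidxR a ha, hidxR b hb], hab⟩
    · intro a ha b hb
      rw [Prod.Lex.toLex_lt_toLex]
      left
      dsimp only
      have h1 := hidxP a ha
      have h2 := hidxR b hb
      exact_mod_cast (by omega : preferred_order.idxOf a < preferred_order.idxOf b)
  exact PySem.List.sorted_eq_of_perm_of_pairwise_lt c.keys (P ++ rest) _ hperm hpw

theorem ordered_counter_py_eq (counter : List (String × Int)) (preferred_order : List String) :
    ordered_counter_py counter preferred_order = ordered_counter_py_alt counter preferred_order := by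
  rw [pv_A_canon, pv_B_canon]

-- ===== VERDICT (by name: the statement is the Claim_ definition above) =====
theorem ordered_counter_py_spec : Claim_equal_ordered_counter_py := by
  intro counter preferred_order _
  exact ordered_counter_py_eq counter preferred_order
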